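-- pv_equiv track=rewrite | github.com/suckoja/static-site-generator | src/spiltor.py | split_markdown_unordered_list
-- ===== SOURCE A (Python) =====
-- def split_markdown_unordered_list(markdown_text):
--     """
--     Splits a Markdown unordered list into a list of individual list items.
--     Handles nested lists by preserving their indentation.
--     """
--     lines = markdown_text.strip().split('\n')
--     list_items = []
--     current_item = []
--
--     for line in lines:
--         # Check if the line starts a new top-level list item
--         # or if it's a continuation of a previous item (e.g., a paragraph within an item)
--         # or a nested item.
--         if line.lstrip().startswith(('* ', '- ', '+ ')) and not current_item:
--             # Start a new item
--             current_item.append(line)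
--         elif line.lstrip().startswith(('* ', '- ', '+ ')) and current_item:
--             # New list item, so append the previous one and start a new one
--             list_items.append('\n'.join(current_item))
--             current_item = [line]
--         elif current_item:
--             # Continuation of the current item (e.g., a multi-line paragraph or nested content)
--             current_item.append(line)
--         else:
--             # If it's not a list item and no item is being built, ignore or handle as non-list content
--             pass
--
--     # Append the last item if it exists
--     if current_item:
--         list_items.append('\n'.join(current_item))
--
--     return list_items
-- ===== SOURCE B (Python) =====
-- def split_markdown_unordered_list(markdown_text):
--     lines = markdown_text.strip().split('\n')
--     starts = [i for i, line in enumerate(lines)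
--               if line.lstrip().startswith(('* ', '- ', '+ '))]
--     return ['\n'.join(lines[s:e]) for s, e in zip(starts, starts[1:] + [len(lines)])]
-- ===== Notes on version B (the rewrite author's own statement) =====
-- stated objective: simpler
-- what changed: Replaces A's stateful accumulator loop (current_item/list_items with four branches plus a final flush) by collecting the item-start indices in one comprehension and slicing the line list between consecutive boundaries.
import Mathlib
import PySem

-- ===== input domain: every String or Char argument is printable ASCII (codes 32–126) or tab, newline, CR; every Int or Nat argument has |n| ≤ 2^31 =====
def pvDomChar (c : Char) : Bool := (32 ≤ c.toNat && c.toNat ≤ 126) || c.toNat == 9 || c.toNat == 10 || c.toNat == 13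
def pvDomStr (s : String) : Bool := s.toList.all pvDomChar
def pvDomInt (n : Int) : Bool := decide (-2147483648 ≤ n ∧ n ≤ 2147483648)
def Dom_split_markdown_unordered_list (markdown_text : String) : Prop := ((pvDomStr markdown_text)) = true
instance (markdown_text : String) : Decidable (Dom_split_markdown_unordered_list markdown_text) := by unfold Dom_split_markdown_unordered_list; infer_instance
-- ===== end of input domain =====

-- B replaces A's stateful accumulator loop by one pass collecting item-start indices
-- and then slicing between consecutive boundaries (objective: simpler decomposition).

-- shared helper: line.lstrip().startswith(('* ', '- ', '+ '))
def pvIsItem (line : String) : Bool :=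
  PySem.Str.startswith (PySem.Str.lstrip line) "* " ||
  PySem.Str.startswith (PySem.Str.lstrip line) "- " ||
  PySem.Str.startswith (PySem.Str.lstrip line) "+ "

-- ===== PORT A =====
def pvStepA (acc : List String × List String) (line : String) : List String × List String :=
  if pvIsItem line && acc.2.isEmpty then (acc.1, acc.2 ++ [line])
  else if pvIsItem line && !acc.2.isEmpty then
    (acc.1 ++ [PySem.Str.join "\n" acc.2], [line])
  else if !acc.2.isEmpty then (acc.1, acc.2 ++ [line])
  else acc

def split_markdown_unordered_list (markdown_text : String) : List String :=
  let lines := (PySem.Str.split? (PySem.Str.strip markdown_text) "\n").getD []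
  let r := lines.foldl pvStepA ([], [])
  if r.2.isEmpty then r.1 else r.1 ++ [PySem.Str.join "\n" r.2]

-- ===== PORT B =====
def split_markdown_unordered_list_alt (markdown_text : String) : List String :=
  let lines := (PySem.Str.split? (PySem.Str.strip markdown_text) "\n").getD []
  let starts := (PySem.List.enumerate lines 0).filterMap
    (fun p => if pvIsItem p.2 then some p.1 else none)
  (starts.zip (starts.drop 1 ++ [(lines.length : Int)])).map
    (fun p => PySem.Str.join "\n" (PySem.List.slice lines (some p.1) (some p.2)))

-- ===== PRECONDITION & SPEC =====
def Spec_split_markdown_unordered_list (markdown_text : String) (out : List String) : Prop := out = split_markdown_unordered_list_alt markdown_text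
instance (markdown_text : String) (out : List String) : Decidable (Spec_split_markdown_unordered_list markdown_text out) := by unfold Spec_split_markdown_unordered_list; infer_instance

-- ===== CLAIM (what is proved, stated in full; the proofs are below) =====
def Claim_equal_split_markdown_unordered_list : Prop := ∀ (markdown_text : String), Dom_split_markdown_unordered_list markdown_text → Spec_split_markdown_unordered_list markdown_text (split_markdown_unordered_list markdown_text)

-- ===== LEMMAS AND PROOFS =====

-- canonical grouping both sides are reduced to
def pvGroup : List String → List (List String)
  | [] => []
  | l :: ls =>
    if pvIsItem l then
      (l :: ls.takeWhile (fun x => !pvIsItem x)) :: pvGroup (ls.dropWhile (fun x => !pvIsItem x))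
    else pvGroup ls
termination_by ls => ls.length
decreasing_by
  · exact Nat.lt_succ_of_le (ls.length_dropWhile_le _)
  · exact Nat.lt_succ_of_le (Nat.le_refl _)

def pvStarts : List String → List Nat
  | [] => []
  | l :: ls => if pvIsItem l then 0 :: (pvStarts ls).map (· + 1) else (pvStarts ls).map (· + 1)

lemma pvGroup_dropWhile (ls : List String) :
    pvGroup (ls.dropWhile (fun x => !pvIsItem x)) = pvGroup ls := by
  induction ls with
  | nil => rfl
  | cons l ls ih =>
    by_cases h : pvIsItem l
    · simp [List.dropWhile, h]
    · simp [List.dropWhile, h, ih, pvGroup]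

lemma takeWhile_eq_take (ls : List String) :
    ls.takeWhile (fun x => !pvIsItem x) = ls.take ((pvStarts ls).headD ls.length) := by
  induction ls with
  | nil => rfl
  | cons l ls ih =>
    by_cases h : pvIsItem l
    · simp [List.takeWhile, h, pvStarts]
    · cases hS : pvStarts ls with
      | nil => simp [List.takeWhile, h, pvStarts, hS, ih]
      | cons a S => simp [List.takeWhile, h, pvStarts, hS, ih]

lemma lemA (lines : List String) : ∀ (items cur : List String),
    (let r := lines.foldl pvStepA (items, cur);
     if r.2.isEmpty then r.1 else r.1 ++ [PySem.Str.join "\n" r.2]) =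
    items ++ (if cur.isEmpty
      then (pvGroup lines).map (PySem.Str.join "\n")
      else PySem.Str.join "\n" (cur ++ lines.takeWhile (fun x => !pvIsItem x)) ::
           (pvGroup (lines.dropWhile (fun x => !pvIsItem x))).map (PySem.Str.join "\n")) := by
  induction lines with
  | nil =>
    intro items cur
    cases cur <;> simp [pvGroup]
  | cons l ls ih =>
    intro items cur
    by_cases h : pvIsItem l
    · cases cur with
      | nil =>
        have hstep : pvStepA (items, []) l = (items, [l]) := by simp [pvStepA, h]
        rw [List.foldl_cons, hstep, ih items [l]]
        simp [pvGroup, h]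
      | cons c cs =>
        have hstep : pvStepA (items, c :: cs) l =
            (items ++ [PySem.Str.join "\n" (c :: cs)], [l]) := by simp [pvStepA, h]
        rw [List.foldl_cons, hstep, ih (items ++ [PySem.Str.join "\n" (c :: cs)]) [l]]
        simp [pvGroup, h, List.takeWhile, List.dropWhile]
    · cases cur with
      | nil =>
        have hstep : pvStepA (items, []) l = (items, []) := by simp [pvStepA, h]
        rw [List.foldl_cons, hstep, ih items []]
        simp [pvGroup, h]
      | cons c cs =>
        have hstep : pvStepA (items, c :: cs) l = (items, (c :: cs) ++ [l]) := by
          simp [pvStepA, h]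
        rw [List.foldl_cons, hstep, ih items ((c :: cs) ++ [l])]
        simp [List.takeWhile, List.dropWhile, h, List.append_assoc]

lemma starts_eq (ls : List String) : ∀ (s : Int),
    (PySem.List.enumerate ls s).filterMap (fun p => if pvIsItem p.2 then some p.1 else none) =
      (pvStarts ls).map (fun n : Nat => s + (n : Int)) := by
  induction ls with
  | nil => intro s; simp [PySem.List.enumerate_nil, pvStarts]
  | cons l ls ih =>
    intro s
    rw [PySem.List.enumerate_cons, List.filterMap_cons]
    by_cases h : pvIsItem l
    · rw [if_pos h]
      simp only [pvStarts, if_pos h, List.map_cons, List.map_map, ih (s + 1)]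
      refine congrArg₂ _ (by simp) ?_
      apply List.map_congr_left
      intro n _
      simp [Function.comp]
      ring
    · rw [if_neg h]
      simp only [pvStarts, if_neg h, List.map_map, ih (s + 1)]
      apply List.map_congr_left
      intro n _
      simp [Function.comp]
      ring

lemma zip_cons_shift {α : Type} (a : α) (M : List α) (E : α) :
    (a :: M).zip (M ++ [E]) = (a, (M ++ [E]).headD E) :: M.zip (M.drop 1 ++ [E]) := by
  cases M <;> simp

lemma sliceList (lines : List String) :
    ((pvStarts lines).zip ((pvStarts lines).drop 1 ++ [lines.length])).map
      (fun p => (lines.drop p.1).take (p.2 - p.1)) = pvGroup lines := by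
  induction lines with
  | nil => simp [pvStarts, pvGroup]
  | cons l ls ih =>
    have shift : ∀ (P : List (Nat × Nat)),
        (P.map (Prod.map (· + 1) (· + 1))).map
            (fun p => ((l :: ls).drop p.1).take (p.2 - p.1)) =
          P.map (fun p => (ls.drop p.1).take (p.2 - p.1)) := by
      intro P
      rw [List.map_map]
      apply List.map_congr_left
      intro p _
      simp [Prod.map, Nat.succ_sub_succ]
    have hzip : ∀ (S : List Nat) (E : Nat),
        (S.map (· + 1)).zip ((S.map (· + 1)).drop 1 ++ [E + 1]) =
          (S.zip (S.drop 1 ++ [E])).map (Prod.map (· + 1) (· + 1)) := by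
      intro S E
      have : (S.map (· + 1)).drop 1 ++ [E + 1] = (S.drop 1 ++ [E]).map (· + 1) := by
        simp
      rw [this, List.zip_map]
    by_cases h : pvIsItem l
    · simp only [pvStarts, if_pos h, List.length_cons]
      rw [List.drop_one, List.tail_cons]
      rw [zip_cons_shift, List.map_cons]
      rw [hzip (pvStarts ls) ls.length, shift, ih]
      have hhead : ((pvStarts ls).map (· + 1) ++ [ls.length + 1]).headD (ls.length + 1) =
          (pvStarts ls).headD ls.length + 1 := by
        cases pvStarts ls <;> simp
      rw [hhead]
      have : pvGroup (l :: ls) =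
          (l :: ls.takeWhile (fun x => !pvIsItem x)) ::
            pvGroup (ls.dropWhile (fun x => !pvIsItem x)) := by
        simp [pvGroup, h]
      rw [this, pvGroup_dropWhile]
      congr 1
      simp only [List.drop_zero, Nat.sub_zero, List.take_succ_cons]
      rw [takeWhile_eq_take]
    · simp only [pvStarts, if_neg h, List.length_cons]
      rw [hzip (pvStarts ls) ls.length, shift, ih]
      simp [pvGroup, h]

-- ===== VERDICT (by name: the statement is the Claim_ definition above) =====
set_option maxHeartbeats 1000000 in
theorem split_markdown_unordered_list_spec : Claim_equal_split_markdown_unordered_list := by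
  intro markdown_text _
  unfold Spec_split_markdown_unordered_list
  unfold split_markdown_unordered_list split_markdown_unordered_list_alt
  dsimp only
  set lines := (PySem.Str.split? (PySem.Str.strip markdown_text) "\n").getD [] with hl
  rw [lemA lines [] [], starts_eq lines 0]
  simp only [zero_add, List.isEmpty_nil, List.nil_append]
  have hcast : ((pvStarts lines).map (fun n : Nat => (n : Int))).drop 1 ++ [(lines.length : Int)] =
      ((pvStarts lines).drop 1 ++ [lines.length]).map (fun n : Nat => (n : Int)) := by
    simp
  rw [hcast, List.zip_map, List.map_map]
  have hfun : (fun p : Int × Int =>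
        PySem.Str.join "\n" (PySem.List.slice lines (some p.1) (some p.2))) ∘
        Prod.map (fun n : Nat => (n : Int)) (fun n : Nat => (n : Int)) =
      fun p : Nat × Nat => PySem.Str.join "\n" ((lines.drop p.1).take (p.2 - p.1)) := by
    funext p
    simp [Prod.map, PySem.List.slice_natCast]
  rw [hfun, ← sliceList lines, List.map_map]
  simp [Function.comp_def]
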